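-- pv_equiv track=rewrite | github.com/Ai-Whisperers/ultrametric-antigen-AI | deliverables/partners/alejandra_rojas/research/dual_metric/dual_metric_scoring.py | get_gene_annotation
-- ===== SOURCE A (Python) =====
-- def get_gene_annotation(position: int) -> str:
--     """Get gene name for a nucleotide position in DENV-4 genome."""
--     # DENV-4 genome organization (approximate positions)
--     genes = [
--         (0, 94, "5'UTR"),
--         (94, 436, "C"),  # Capsid
--         (436, 934, "prM"),  # prM/M
--         (934, 2419, "E"),  # Envelope
--         (2419, 3474, "NS1"),
--         (3474, 4128, "NS2A"),
--         (4128, 4518, "NS2B"),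
--         (4518, 6378, "NS3"),
--         (6378, 6531, "NS4A"),
--         (6531, 6600, "2K"),
--         (6600, 7350, "NS4B"),
--         (7350, 10095, "NS5"),
--         (10095, 10723, "3'UTR"),
--     ]
--
--     for start, end, name in genes:
--         if start <= position < end:
--             return name
--
--     return "intergenic"
-- ===== SOURCE B (Python) =====
-- import bisect
--
-- _BOUNDS = [0, 94, 436, 934, 2419, 3474, 4128, 4518, 6378, 6531, 6600, 7350, 10095, 10723]
-- _NAMES = ["5'UTR", "C", "prM", "E", "NS1", "NS2A", "NS2B", "NS3",
--           "NS4A", "2K", "NS4B", "NS5", "3'UTR"]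
--
--
-- def get_gene_annotation(position: int) -> str:
--     """Get gene name for a nucleotide position in DENV-4 genome."""
--     idx = bisect.bisect_right(_BOUNDS, position) - 1
--     if 0 <= idx < len(_NAMES):
--         return _NAMES[idx]
--     return "intergenic"
-- ===== Notes on version B (the rewrite author's own statement) =====
-- stated objective: idiomatic
-- what changed: Replaces the linear scan over (start,end,name) interval tuples by binary search (bisect_right) over the sorted boundary-position list with a parallel gene-name table, exploiting that the intervals are contiguous.
import Mathlib
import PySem

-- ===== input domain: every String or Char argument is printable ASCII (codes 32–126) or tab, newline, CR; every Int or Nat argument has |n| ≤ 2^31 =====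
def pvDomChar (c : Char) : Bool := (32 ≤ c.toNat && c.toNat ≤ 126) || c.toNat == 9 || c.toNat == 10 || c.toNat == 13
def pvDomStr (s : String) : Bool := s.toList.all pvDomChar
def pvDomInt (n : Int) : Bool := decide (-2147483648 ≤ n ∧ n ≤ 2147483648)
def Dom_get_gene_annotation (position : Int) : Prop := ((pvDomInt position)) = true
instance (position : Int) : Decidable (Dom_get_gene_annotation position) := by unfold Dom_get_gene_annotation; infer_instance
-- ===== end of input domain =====

-- B replaces A's linear scan over (start, end, name) interval tuples by bisect_right
-- over the sorted boundary list with a parallel name table (idiomatic; relies on the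
-- intervals being contiguous).

-- ===== PORT A =====
def pvGenes : List (Int × Int × String) :=
  [(0, 94, "5'UTR"), (94, 436, "C"), (436, 934, "prM"), (934, 2419, "E"),
   (2419, 3474, "NS1"), (3474, 4128, "NS2A"), (4128, 4518, "NS2B"),
   (4518, 6378, "NS3"), (6378, 6531, "NS4A"), (6531, 6600, "2K"),
   (6600, 7350, "NS4B"), (7350, 10095, "NS5"), (10095, 10723, "3'UTR")]

-- the `for start, end, name in genes: if start <= position < end: return name` loop
def pvLoopA : List (Int × Int × String) → Int → String
  | [], _ => "intergenic"
  | g :: rest, p => if g.1 ≤ p ∧ p < g.2.1 then g.2.2 else pvLoopA rest p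

def get_gene_annotation (position : Int) : String :=
  pvLoopA pvGenes position

-- ===== PORT B =====
def pvBounds : List Int :=
  [0, 94, 436, 934, 2419, 3474, 4128, 4518, 6378, 6531, 6600, 7350, 10095, 10723]

def pvNames : List String :=
  ["5'UTR", "C", "prM", "E", "NS1", "NS2A", "NS2B", "NS3", "NS4A", "2K", "NS4B", "NS5", "3'UTR"]

-- exact port of CPython's bisect.bisect_right: while lo < hi: mid = (lo+hi)//2; …
-- (fuel is only a structural totality guard; fuel = hi ≥ hi - lo iterations always suffice)
def pvBisectRight (a : List Int) (x : Int) : Nat → Nat → Nat → Nat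
  | 0, lo, _ => lo
  | fuel + 1, lo, hi =>
    if lo < hi then
      let mid := (lo + hi) / 2
      if x < a.getD mid 0 then pvBisectRight a x fuel lo mid
      else pvBisectRight a x fuel (mid + 1) hi
    else lo

def get_gene_annotation_alt (position : Int) : String :=
  let idx : Int := (pvBisectRight pvBounds position pvBounds.length 0 pvBounds.length : Int) - 1
  if 0 ≤ idx ∧ idx < (pvNames.length : Int) then pvNames.getD idx.toNat "intergenic"
  else "intergenic"

-- ===== PRECONDITION & SPEC =====
def Spec_get_gene_annotation (position : Int) (out : String) : Prop := out = get_gene_annotation_alt position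
instance (position : Int) (out : String) : Decidable (Spec_get_gene_annotation position out) := by unfold Spec_get_gene_annotation; infer_instance

-- ===== CLAIM (what is proved, stated in full; the proofs are below) =====
def Claim_equal_get_gene_annotation : Prop := ∀ (position : Int), Dom_get_gene_annotation position → Spec_get_gene_annotation position (get_gene_annotation position)

-- ===== LEMMAS AND PROOFS =====

-- loop invariant of binary search: the result r satisfies lo ≤ r ≤ hi,
-- a[r-1] ≤ x when r > lo, and x < a[r] when r < hi
theorem pvBisect_inv (n : Nat) : ∀ (a : List Int) (x : Int) (lo hi : Nat),
    hi - lo ≤ n → lo ≤ hi →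
    lo ≤ pvBisectRight a x n lo hi ∧ pvBisectRight a x n lo hi ≤ hi ∧
    (lo < pvBisectRight a x n lo hi → a.getD (pvBisectRight a x n lo hi - 1) 0 ≤ x) ∧
    (pvBisectRight a x n lo hi < hi → x < a.getD (pvBisectRight a x n lo hi) 0) := by
  induction n with
  | zero =>
    intro a x lo hi hn hle
    have h : lo = hi := by omega
    rw [pvBisectRight]
    exact ⟨le_refl _, hle, fun hr => absurd hr (lt_irrefl _), fun hr => absurd hr (by omega)⟩
  | succ n ih =>
    intro a x lo hi hn hle
    by_cases h : lo < hi
    · rw [pvBisectRight, if_pos h]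
      dsimp only
      by_cases hx : x < a.getD ((lo + hi) / 2) 0
      · rw [if_pos hx]
        obtain ⟨i1, i2, i3, i4⟩ := ih a x lo ((lo + hi) / 2) (by omega) (by omega)
        refine ⟨i1, by omega, i3, fun hr => ?_⟩
        rcases eq_or_lt_of_le i2 with he | hl
        · rw [he]; exact hx
        · exact i4 hl
      · rw [if_neg hx]
        obtain ⟨i1, i2, i3, i4⟩ := ih a x ((lo + hi) / 2 + 1) hi (by omega) (by omega)
        refine ⟨by omega, i2, fun hr => ?_, i4⟩
        rcases eq_or_lt_of_le i1 with he | hl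
        · rw [← he]; simpa using not_lt.1 hx
        · exact i3 hl
    · rw [pvBisectRight, if_neg h]
      exact ⟨le_refl _, hle, fun hr => absurd hr (lt_irrefl _), fun hr => absurd hr h⟩

-- the concrete boundary list is nondecreasing
theorem pvBounds_mono_dec : ∀ j < 14, ∀ i ≤ j, pvBounds.getD i 0 ≤ pvBounds.getD j 0 := by decide

theorem pvBounds_mono (i j : Nat) (hij : i ≤ j) (hj : j < 14) :
    pvBounds.getD i 0 ≤ pvBounds.getD j 0 := pvBounds_mono_dec j hj i hij

-- uniqueness: any k bracketed by the boundaries is the bisect result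
theorem pvBisect_eq (p : Int) (k : Nat) (hk : k ≤ 14)
    (h1 : k = 0 ∨ pvBounds.getD (k - 1) 0 ≤ p)
    (h2 : k = 14 ∨ p < pvBounds.getD k 0) :
    pvBisectRight pvBounds p 14 0 14 = k := by
  obtain ⟨i1, i2, i3, i4⟩ := pvBisect_inv 14 pvBounds p 0 14 (by omega) (by omega)
  rcases Nat.lt_trichotomy (pvBisectRight pvBounds p 14 0 14) k with hlt | he | hgt
  · rcases h1 with h0 | hb
    · omega
    · have h4 := i4 (by omega)
      have hm := pvBounds_mono (pvBisectRight pvBounds p 14 0 14) (k - 1) (by omega) (by omega)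
      omega
  · exact he
  · rcases h2 with h0 | hb
    · omega
    · have h3 := i3 (by omega)
      have hm := pvBounds_mono k (pvBisectRight pvBounds p 14 0 14 - 1) (by omega) (by omega)
      omega

-- ===== VERDICT (by name: the statement is the Claim_ definition above) =====
set_option maxHeartbeats 1000000 in
theorem get_gene_annotation_spec : Claim_equal_get_gene_annotation := by
  intro p _
  unfold Spec_get_gene_annotation get_gene_annotation
  simp only [pvGenes, pvLoopA]
  have L : pvBounds.length = 14 := rfl
  by_cases h1 : (0:Int) ≤ p ∧ p < 94
  · rw [if_pos h1]
    unfold get_gene_annotation_alt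
    rw [L, pvBisect_eq p 1 (by omega) (Or.inr (show (0:Int) ≤ p by omega)) (Or.inr (show p < (94:Int) by omega))]
    rfl
  · rw [if_neg h1]
    by_cases h2 : (94:Int) ≤ p ∧ p < 436
    · rw [if_pos h2]
      unfold get_gene_annotation_alt
      rw [L, pvBisect_eq p 2 (by omega) (Or.inr (show (94:Int) ≤ p by omega)) (Or.inr (show p < (436:Int) by omega))]
      rfl
    · rw [if_neg h2]
      by_cases h3 : (436:Int) ≤ p ∧ p < 934
      · rw [if_pos h3]
        unfold get_gene_annotation_alt
        rw [L, pvBisect_eq p 3 (by omega) (Or.inr (show (436:Int) ≤ p by omega)) (Or.inr (show p < (934:Int) by omega))]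
        rfl
      · rw [if_neg h3]
        by_cases h4 : (934:Int) ≤ p ∧ p < 2419
        · rw [if_pos h4]
          unfold get_gene_annotation_alt
          rw [L, pvBisect_eq p 4 (by omega) (Or.inr (show (934:Int) ≤ p by omega)) (Or.inr (show p < (2419:Int) by omega))]
          rfl
        · rw [if_neg h4]
          by_cases h5 : (2419:Int) ≤ p ∧ p < 3474
          · rw [if_pos h5]
            unfold get_gene_annotation_alt
            rw [L, pvBisect_eq p 5 (by omega) (Or.inr (show (2419:Int) ≤ p by omega)) (Or.inr (show p < (3474:Int) by omega))]
            rfl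
          · rw [if_neg h5]
            by_cases h6 : (3474:Int) ≤ p ∧ p < 4128
            · rw [if_pos h6]
              unfold get_gene_annotation_alt
              rw [L, pvBisect_eq p 6 (by omega) (Or.inr (show (3474:Int) ≤ p by omega)) (Or.inr (show p < (4128:Int) by omega))]
              rfl
            · rw [if_neg h6]
              by_cases h7 : (4128:Int) ≤ p ∧ p < 4518
              · rw [if_pos h7]
                unfold get_gene_annotation_alt
                rw [L, pvBisect_eq p 7 (by omega) (Or.inr (show (4128:Int) ≤ p by omega)) (Or.inr (show p < (4518:Int) by omega))]
                rfl
              · rw [if_neg h7]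
                by_cases h8 : (4518:Int) ≤ p ∧ p < 6378
                · rw [if_pos h8]
                  unfold get_gene_annotation_alt
                  rw [L, pvBisect_eq p 8 (by omega) (Or.inr (show (4518:Int) ≤ p by omega)) (Or.inr (show p < (6378:Int) by omega))]
                  rfl
                · rw [if_neg h8]
                  by_cases h9 : (6378:Int) ≤ p ∧ p < 6531
                  · rw [if_pos h9]
                    unfold get_gene_annotation_alt
                    rw [L, pvBisect_eq p 9 (by omega) (Or.inr (show (6378:Int) ≤ p by omega)) (Or.inr (show p < (6531:Int) by omega))]
                    rfl
                  · rw [if_neg h9]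
                    by_cases h10 : (6531:Int) ≤ p ∧ p < 6600
                    · rw [if_pos h10]
                      unfold get_gene_annotation_alt
                      rw [L, pvBisect_eq p 10 (by omega) (Or.inr (show (6531:Int) ≤ p by omega)) (Or.inr (show p < (6600:Int) by omega))]
                      rfl
                    · rw [if_neg h10]
                      by_cases h11 : (6600:Int) ≤ p ∧ p < 7350
                      · rw [if_pos h11]
                        unfold get_gene_annotation_alt
                        rw [L, pvBisect_eq p 11 (by omega) (Or.inr (show (6600:Int) ≤ p by omega)) (Or.inr (show p < (7350:Int) by omega))]
                        rfl
                      · rw [if_neg h11]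
                        by_cases h12 : (7350:Int) ≤ p ∧ p < 10095
                        · rw [if_pos h12]
                          unfold get_gene_annotation_alt
                          rw [L, pvBisect_eq p 12 (by omega) (Or.inr (show (7350:Int) ≤ p by omega)) (Or.inr (show p < (10095:Int) by omega))]
                          rfl
                        · rw [if_neg h12]
                          by_cases h13 : (10095:Int) ≤ p ∧ p < 10723
                          · rw [if_pos h13]
                            unfold get_gene_annotation_alt
                            rw [L, pvBisect_eq p 13 (by omega) (Or.inr (show (10095:Int) ≤ p by omega)) (Or.inr (show p < (10723:Int) by omega))]
                            rfl
                          · rw [if_neg h13]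
                            unfold get_gene_annotation_alt
                            by_cases hp : p < 0
                            · rw [L, pvBisect_eq p 0 (by omega) (Or.inl rfl) (Or.inr (show p < (0:Int) by omega))]
                              rfl
                            · rw [L, pvBisect_eq p 14 (by omega) (Or.inr (show (10723:Int) ≤ p by omega)) (Or.inl rfl)]
                              rfl
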